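-- pv_equiv track=rewrite | github.com/matt24ck/ca117 | wordcomps_031.py | most_es
-- ===== SOURCE A (Python) =====
-- def most_es(a):
--     new_list = []
--     ecount = 0
--     for line in a:
--         count = 0
--         i = 0
--         while i < len(line):
--             if line[i] == "e":
--                 count += 1
--             i += 1
--         if count > ecount:
--             ecount = count
--     for line in a:
--         count = 0
--         i = 0
--         while i < len(line):
--             if line[i] == "e":
--                 count += 1
--             i += 1
--         if count == ecount:
--             new_list.append(line)
--     return new_list
-- ===== SOURCE B (Python) =====
-- def most_es(a):
--     best = 0
--     winners = []
--     for line in a: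
--         c = line.count('e')
--         if c > best:
--             best = c
--             winners = [line]
--         elif c == best:
--             winners.append(line)
--     return winners
-- ===== Notes on version B (the rewrite author's own statement) =====
-- stated objective: faster
-- what changed: Replaces A's two independent full passes (one to find the max 'e'-count, one to re-count every line and filter) with a single pass keeping a running (best count, winners) accumulator that resets the winners list when a strictly larger count appears; each line is scanned once via str.count instead of twice via a manual index loop.
import Mathlib
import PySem

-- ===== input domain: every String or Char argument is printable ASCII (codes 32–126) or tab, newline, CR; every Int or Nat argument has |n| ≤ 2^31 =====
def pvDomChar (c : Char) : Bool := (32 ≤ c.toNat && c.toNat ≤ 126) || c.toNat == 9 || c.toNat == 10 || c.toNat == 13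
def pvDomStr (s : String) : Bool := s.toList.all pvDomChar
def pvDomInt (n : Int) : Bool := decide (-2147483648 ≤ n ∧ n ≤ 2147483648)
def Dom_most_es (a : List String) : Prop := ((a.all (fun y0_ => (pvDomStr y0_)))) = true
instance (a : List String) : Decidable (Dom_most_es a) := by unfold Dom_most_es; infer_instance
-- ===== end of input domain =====

-- B makes a single pass with a running (best count, winners) accumulator instead of A's two full passes.

-- ===== PORT A =====
-- the inner 'while i < len(line)' counting loop of A, step for step
def aCountAux (cs : List Char) (i : Nat) (count : Nat) : Nat :=
  if h : i < cs.length then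
    aCountAux cs (i + 1) (if cs[i] = 'e' then count + 1 else count)
  else count
termination_by cs.length - i

def most_es (a : List String) : List String :=
  let ecount := a.foldl (fun ecount line =>
    let count := aCountAux line.toList 0 0
    if count > ecount then count else ecount) 0
  a.foldl (fun new_list line =>
    let count := aCountAux line.toList 0 0
    if count = ecount then new_list ++ [line] else new_list) []

-- ===== PORT B =====
def most_es_alt (a : List String) : List String :=
  (a.foldl (fun st line =>
    let c := PySem.Str.count line "e"
    if c > st.1 then (c, [line])
    else if c = st.1 then (st.1, st.2 ++ [line])
    else st) ((0 : Nat), ([] : List String))).2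

-- ===== PRECONDITION & SPEC =====
def Spec_most_es (a : List String) (out : List String) : Prop := out = most_es_alt a
instance (a : List String) (out : List String) : Decidable (Spec_most_es a out) := by unfold Spec_most_es; infer_instance

-- ===== CLAIM (what is proved, stated in full; the proofs are below) =====
def Claim_equal_most_es : Prop := ∀ (a : List String), Dom_most_es a → Spec_most_es a (most_es a)

-- ===== LEMMAS AND PROOFS =====

-- A's while-loop counts the 'e's in the suffix from index i
theorem aCountAux_eq (cs : List Char) (i count : Nat) :
    aCountAux cs i count = count + (cs.drop i).count 'e' := by
  fun_induction aCountAux cs i count with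
  | case1 i count h ih =>
    simp only [dite_eq_ite] at ih
    rw [ih, List.drop_eq_getElem_cons h, List.count_cons]
    by_cases he : cs[i] = 'e' <;> simp [he] <;> omega
  | case2 i count h =>
    have hnil : cs.drop i = [] := List.drop_eq_nil_of_le (by omega)
    simp [hnil]

theorem count_go_e (cs : List Char) (fuel acc : Nat) (hf : cs.length ≤ fuel) :
    PySem.Chars.count.go ['e'] fuel cs acc = acc + cs.count 'e' := by
  induction cs generalizing fuel acc with
  | nil => cases fuel <;> simp [PySem.Chars.count.go]
  | cons h t ih =>
    cases fuel with
    | zero => simp at hf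
    | succ f =>
      simp only [PySem.Chars.count.go]
      have hpre : (['e'].isPrefixOf (h :: t)) = (h == 'e') := by
        simp [List.isPrefixOf, eq_comm]
      rw [hpre]
      by_cases he : h = 'e'
      · simp [he, ih _ _ (by simpa using hf)]
        omega
      · simp [he, ih _ _ (by simpa using hf)]

theorem chars_count_e (cs : List Char) : PySem.Chars.count cs ['e'] = cs.count 'e' := by
  unfold PySem.Chars.count
  have h := count_go_e cs cs.length 0 le_rfl
  simpa using h

theorem str_count_e (line : String) :
    PySem.Str.count line "e" = line.toList.count 'e' := by
  rw [PySem.Str.count_eq]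
  exact chars_count_e line.toList

-- the per-line count both programs use
theorem aCount_eq_strCount (line : String) :
    aCountAux line.toList 0 0 = PySem.Str.count line "e" := by
  rw [str_count_e, aCountAux_eq]; simp

-- abbreviation for the common per-line count
def cntE (line : String) : Nat := PySem.Str.count line "e"

-- A's running max equals foldl max over the counts
theorem fold_max_eq (a : List String) (e : Nat) :
    a.foldl (fun ecount line =>
      let count := aCountAux line.toList 0 0
      if count > ecount then count else ecount) e
    = a.foldl (fun m line => max m (cntE line)) e := by
  induction a generalizing e with
  | nil => rfl
  | cons x t ih =>
    simp only [List.foldl_cons]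
    rw [ih]
    congr 1
    rw [aCount_eq_strCount]
    unfold cntE
    split_ifs with hgt <;> omega

-- the running max only grows
theorem le_fold_max (a : List String) (b : Nat) :
    b ≤ a.foldl (fun m line => max m (cntE line)) b := by
  induction a generalizing b with
  | nil => simp
  | cons x t ih => exact le_trans (le_max_left _ _) (ih (max b (cntE x)))

-- A's second pass is a filter against the final max
theorem a_filter_pass (a : List String) (m : Nat) (acc : List String) :
    a.foldl (fun new_list line =>
      let count := aCountAux line.toList 0 0
      if count = m then new_list ++ [line] else new_list) acc
    = acc ++ a.filter (fun line => cntE line = m) := by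
  induction a generalizing acc with
  | nil => simp
  | cons x t ih =>
    simp only [List.foldl_cons, List.filter_cons]
    rw [aCount_eq_strCount]
    by_cases hx : PySem.Str.count x "e" = m
    · rw [if_pos hx, ih]
      have hx' : (decide (cntE x = m)) = true := by
        simp only [decide_eq_true_eq]; exact hx
      rw [hx']
      simp
    · rw [if_neg hx, ih]
      have hx' : (decide (cntE x = m)) = false := by
        simp only [decide_eq_false_iff_not]; exact hx
      rw [hx']
      simp

-- B's single pass: from any state (b, w), the final winners are w (kept only if the
-- max never rises above b) followed by the rest-lines whose count equals the final max
theorem b_loop_inv (a : List String) (b : Nat) (w : List String) :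
    (a.foldl (fun st line =>
      let c := PySem.Str.count line "e"
      if c > st.1 then (c, [line])
      else if c = st.1 then (st.1, st.2 ++ [line])
      else st) (b, w)).2
    = (if b = a.foldl (fun m line => max m (cntE line)) b then w else [])
      ++ a.filter (fun line => cntE line = a.foldl (fun m line => max m (cntE line)) b) := by
  induction a generalizing b w with
  | nil => simp
  | cons x t ih =>
    simp only [List.foldl_cons, List.filter_cons]
    by_cases h1 : cntE x > b
    · have h1' : PySem.Str.count x "e" > b := h1
      rw [if_pos h1', ih]
      simp only [show PySem.Str.count x "e" = cntE x from rfl]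
      have hmax : max b (cntE x) = cntE x := by omega
      simp only [hmax]
      have hM : cntE x ≤ t.foldl (fun m line => max m (cntE line)) (cntE x) :=
        le_fold_max t (cntE x)
      generalize hMe : t.foldl (fun m line => max m (cntE line)) (cntE x) = M at hM ⊢
      have hbne : b ≠ M := by omega
      rw [if_neg hbne]
      by_cases h2 : cntE x = M
      · have hd : decide (cntE x = M) = true := by
          simp only [decide_eq_true_eq]; exact h2
        rw [if_pos h2, hd]
        simp
      · have hd : decide (cntE x = M) = false := by
          simp only [decide_eq_false_iff_not]; exact h2
        rw [if_neg h2, hd]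
        simp
    · have h1' : ¬ PySem.Str.count x "e" > b := h1
      have hmax : max b (cntE x) = b := by omega
      by_cases h2 : cntE x = b
      · have h2' : PySem.Str.count x "e" = b := h2
        rw [if_neg h1', if_pos h2', ih]
        simp only [hmax]
        generalize hMe : t.foldl (fun m line => max m (cntE line)) b = M
        by_cases h3 : b = M
        · have hd : decide (cntE x = M) = true := by
            simp only [decide_eq_true_eq]; omega
          simp only [if_pos h3, hd, if_true]
          simp
        · have hd : decide (cntE x = M) = false := by
            simp only [decide_eq_false_iff_not]; omega
          simp only [if_neg h3, hd]
          simp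
      · have h2' : ¬ PySem.Str.count x "e" = b := h2
        rw [if_neg h1', if_neg h2', ih]
        simp only [hmax]
        have hM : b ≤ t.foldl (fun m line => max m (cntE line)) b := le_fold_max t b
        generalize hMe : t.foldl (fun m line => max m (cntE line)) b = M at hM ⊢
        have hd : decide (cntE x = M) = false := by
          simp only [decide_eq_false_iff_not]; omega
        rw [hd]
        simp

-- ===== VERDICT (by name: the statement is the Claim_ definition above) =====
theorem most_es_spec : Claim_equal_most_es := by
  intro a _
  unfold Spec_most_es most_es most_es_alt
  simp only []
  rw [fold_max_eq, a_filter_pass, b_loop_inv]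
  simp
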